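-- pv_equiv track=rewrite | github.com/981377660LMT/algorithm-study | 22_专题/离线查询/并查集/网格矩阵/6260. 矩阵查询可获得的最大分数-离线查询+堆或者并查集.py | maxPoints2
-- ===== SOURCE A (Python) =====
-- from collections import defaultdict
-- from typing import DefaultDict, List
--
-- DIR4 = [(0, 1), (0, -1), (1, 0), (-1, 0)]
--
-- def maxPoints2(grid: List[List[int]], queries: List[int]) -> List[int]:
--     """离线查询+并查集"""
--     ROW, COL = len(grid), len(grid[0])
--     nums = []
--     for r in range(ROW):
--         for c in range(COL):
--             nums.append((grid[r][c], r, c))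
--     nums.sort(key=lambda x: x[0])
--     Q = sorted([(qv, qi) for qi, qv in enumerate(queries)], key=lambda x: x[0])
--
--     ni = 0
--     res = [0] * len(Q)
--     uf = UnionFindArray(ROW * COL)
--     for qv, qi in Q:
--         while ni < len(nums) and nums[ni][0] < qv:  # 水位上涨,合并
--             _, curRow, curCol = nums[ni]
--             ni += 1
--             for dr, dc in DIR4:
--                 nextRow, nextCol = curRow + dr, curCol + dc
--                 if 0 <= nextRow < ROW and 0 <= nextCol < COL and grid[nextRow][nextCol] < qv:
--                     uf.union(curRow * COL + curCol, nextRow * COL + nextCol)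
--         if grid[0][0] < qv:
--             res[qi] = uf.rank[uf.find(0)]
--     return res
--
-- class UnionFindArray:
--
--     __slots__ = ("n", "part", "parent", "rank")
--
--     def __init__(self, n: int):
--         self.n = n
--         self.part = n
--         self.parent = list(range(n))
--         self.rank = [1] * n
--
--     def find(self, x: int) -> int:
--         while x != self.parent[x]:
--             self.parent[x] = self.parent[self.parent[x]]
--             x = self.parent[x]
--         return x
--
--     def union(self, x: int, y: int) -> bool:
--         rootX = self.find(x)
--         rootY = self.find(y)
--         if rootX == rootY:
--             return False
--         if self.rank[rootX] > self.rank[rootY]: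
--             rootX, rootY = rootY, rootX
--         self.parent[rootX] = rootY
--         self.rank[rootY] += self.rank[rootX]
--         self.part -= 1
--         return True
--
--     def isConnected(self, x: int, y: int) -> bool:
--         return self.find(x) == self.find(y)
--
--     def getGroups(self) -> DefaultDict[int, List[int]]:
--         groups = defaultdict(list)
--         for key in range(self.n):
--             root = self.find(key)
--             groups[root].append(key)
--         return groups
--
--     def getRoots(self) -> List[int]:
--         return list(set(self.find(key) for key in self.parent))
--
--     def __repr__(self) -> str:
--         return "\n".join(f"{root}: {member}" for root, member in self.getGroups().items())
--
--     def __len__(self) -> int: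
--         return self.part
-- ===== SOURCE B (Python) =====
-- def maxPoints2(grid, queries):
--     """Offline sweep with small-to-large component relabeling (comp labels +
--     per-label bucket lists) instead of a union-find with path halving."""
--     ROW, COL = len(grid), len(grid[0])
--     n = ROW * COL
--     cells = sorted(((grid[r][c], r, c) for r in range(ROW) for c in range(COL)),
--                    key=lambda t: t[0])
--     comp = list(range(n))          # label of each cell
--     bucket = [[i] for i in range(n)]  # bucket[l] = cells currently labeled l
--     res = [0] * len(queries)
--     ptr = 0
--     for qv, qi in sorted(((qv, qi) for qi, qv in enumerate(queries)),
--                          key=lambda t: t[0]):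
--         while ptr < len(cells) and cells[ptr][0] < qv:
--             _, r, c = cells[ptr]
--             ptr += 1
--             for dr, dc in ((0, 1), (0, -1), (1, 0), (-1, 0)):
--                 nr, nc = r + dr, c + dc
--                 if 0 <= nr < ROW and 0 <= nc < COL and grid[nr][nc] < qv:
--                     a, b = comp[r * COL + c], comp[nr * COL + nc]
--                     if a != b:
--                         if len(bucket[a]) > len(bucket[b]):
--                             a, b = b, a
--                         for v in bucket[a]:
--                             comp[v] = b
--                         bucket[b] += bucket[a]
--                         bucket[a] = []
--         if grid[0][0] < qv:
--             res[qi] = len(bucket[comp[0]])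
--     return res
-- ===== Notes on version B (the rewrite author's own statement) =====
-- stated objective: alternative
-- what changed: The union-find with path halving and union-by-rank is replaced by a small-to-large component-relabeling structure (a label per cell plus a bucket list per label, merging by rewriting the smaller bucket's labels), keeping the same offline ascending-query sweep.
import Mathlib
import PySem

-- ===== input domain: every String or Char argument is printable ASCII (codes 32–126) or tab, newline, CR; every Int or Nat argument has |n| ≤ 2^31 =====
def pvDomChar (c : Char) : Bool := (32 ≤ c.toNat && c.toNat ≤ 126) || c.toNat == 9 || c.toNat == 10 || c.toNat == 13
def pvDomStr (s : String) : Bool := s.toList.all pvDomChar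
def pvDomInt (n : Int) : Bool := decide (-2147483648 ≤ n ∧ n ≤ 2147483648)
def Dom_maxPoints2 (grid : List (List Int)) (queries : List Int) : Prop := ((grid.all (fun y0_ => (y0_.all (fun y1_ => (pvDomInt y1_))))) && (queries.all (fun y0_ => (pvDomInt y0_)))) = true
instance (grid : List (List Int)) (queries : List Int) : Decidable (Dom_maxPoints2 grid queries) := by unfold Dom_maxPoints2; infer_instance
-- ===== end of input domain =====

-- B replaces A's path-halving union-find by a small-to-large component-relabeling
-- structure inside the same offline ascending-query sweep (objective: alternative).


-- ===== PORT A =====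

-- list indexing at a provably nonnegative in-range index (all indices below are
-- coordinates 0 ≤ r < ROW, 0 ≤ c < COL or cell ids r*COL+c; Python raises on
-- out-of-range, which never happens inside Pre_)
def pvGetI (l : List Int) (i : Int) : Int := l.getD i.toNat 0
def pvGetL (l : List (List Int)) (i : Int) : List Int := l.getD i.toNat []
def pvCell (grid : List (List Int)) (r c : Int) : Int := pvGetI (pvGetL grid r) c

def pvDir4 : List (Int × Int) := [(0, 1), (0, -1), (1, 0), (-1, 0)]

structure PVUF where
  n : Int
  part : Int
  parent : List Int
  rank : List Int

-- UnionFindArray.find with path halving; fuel = len(parent) (enough: within the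
-- forest invariant the path to the root has fewer than len(parent) steps)
def pvUFFind : Nat → List Int → Int → Int × List Int
  | 0, parent, x => (x, parent)
  | fuel + 1, parent, x =>
    let px := pvGetI parent x
    if x = px then (x, parent)
    else
      let gx := pvGetI parent px
      let parent' := parent.set x.toNat gx
      pvUFFind fuel parent' gx

def pvFind (uf : PVUF) (x : Int) : Int × PVUF :=
  let rp := pvUFFind uf.parent.length uf.parent x
  (rp.1, { uf with parent := rp.2 })

def pvUnion (uf : PVUF) (x y : Int) : Bool × PVUF :=
  let fx := pvFind uf x
  let rootX := fx.1
  let uf1 := fx.2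
  let fy := pvFind uf1 y
  let rootY := fy.1
  let uf2 := fy.2
  if rootX = rootY then (false, uf2)
  else
    let rr := if pvGetI uf2.rank rootX > pvGetI uf2.rank rootY then (rootY, rootX) else (rootX, rootY)
    (true, { uf2 with
      parent := uf2.parent.set rr.1.toNat rr.2,
      rank := uf2.rank.set rr.2.toNat (pvGetI uf2.rank rr.2 + pvGetI uf2.rank rr.1),
      part := uf2.part - 1 })

-- the 'while ni < len(nums) and nums[ni][0] < qv' loop; fuel = len(nums)
def pvSweepA (grid : List (List Int)) (ROW COL qv : Int) (nums : List (Int × Int × Int)) :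
    Nat → Nat → PVUF → Nat × PVUF
  | 0, ni, uf => (ni, uf)
  | fuel + 1, ni, uf =>
    match nums[ni]? with
    | none => (ni, uf)
    | some t =>
      if t.1 < qv then
        let curRow := t.2.1
        let curCol := t.2.2
        let uf' := pvDir4.foldl (fun uf d =>
          let nextRow := curRow + d.1
          let nextCol := curCol + d.2
          if 0 ≤ nextRow ∧ nextRow < ROW ∧ 0 ≤ nextCol ∧ nextCol < COL ∧
              pvCell grid nextRow nextCol < qv then
            (pvUnion uf (curRow * COL + curCol) (nextRow * COL + nextCol)).2
          else uf) uf
        pvSweepA grid ROW COL qv nums fuel (ni + 1) uf'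
      else (ni, uf)

def maxPoints2 (grid : List (List Int)) (queries : List Int) : List Int :=
  let ROW : Int := grid.length
  let COL : Int := (grid.headD []).length
  let nums0 := (PySem.List.pyRange 0 ROW 1).foldl (fun acc r =>
    (PySem.List.pyRange 0 COL 1).foldl (fun acc c =>
      acc ++ [(pvCell grid r c, r, c)]) acc) []
  let nums := PySem.List.sorted nums0 (fun t => t.1) false
  let Q := PySem.List.sorted ((PySem.List.enumerate queries).map (fun p => (p.2, p.1)))
    (fun t => t.1) false
  let uf0 : PVUF := ⟨ROW * COL, ROW * COL, PySem.List.pyRange 0 (ROW * COL) 1,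
    PySem.List.pyRepeat [1] (ROW * COL)⟩
  let res0 : List Int := PySem.List.pyRepeat [0] (Q.length : Int)
  let fin := Q.foldl (fun (st : Nat × List Int × PVUF) q =>
    let s := pvSweepA grid ROW COL q.1 nums nums.length st.1 st.2.2
    if pvCell grid 0 0 < q.1 then
      let f0 := pvFind s.2 0
      (s.1, PySem.List.pySetD st.2.1 q.2 (pvGetI f0.2.rank f0.1), f0.2)
    else (s.1, st.2.1, s.2)) (0, res0, uf0)
  fin.2.1

-- ===== PORT B =====

-- merge step of B: relabel the smaller bucket onto the larger one
def pvRelabel (comp : List Int) (bucket : List (List Int)) (x y : Int) :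
    List Int × List (List Int) :=
  let a := pvGetI comp x
  let b := pvGetI comp y
  if a = b then (comp, bucket)
  else
    let ab := if (pvGetL bucket a).length > (pvGetL bucket b).length then (b, a) else (a, b)
    let movers := pvGetL bucket ab.1
    let comp' := movers.foldl (fun comp v => PySem.List.pySetD comp v ab.2) comp
    let bucket' := PySem.List.pySetD bucket ab.2 (pvGetL bucket ab.2 ++ movers)
    (comp', PySem.List.pySetD bucket' ab.1 [])

-- B's copy of the ascending sweep, over the relabeling structure
def pvSweepB (grid : List (List Int)) (ROW COL qv : Int) (cells : List (Int × Int × Int)) :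
    Nat → Nat → List Int × List (List Int) → Nat × (List Int × List (List Int))
  | 0, ptr, cb => (ptr, cb)
  | fuel + 1, ptr, cb =>
    match cells[ptr]? with
    | none => (ptr, cb)
    | some t =>
      if t.1 < qv then
        let r := t.2.1
        let c := t.2.2
        let cb' := pvDir4.foldl (fun cb d =>
          let nr := r + d.1
          let nc := c + d.2
          if 0 ≤ nr ∧ nr < ROW ∧ 0 ≤ nc ∧ nc < COL ∧ pvCell grid nr nc < qv then
            pvRelabel cb.1 cb.2 (r * COL + c) (nr * COL + nc)
          else cb) cb
        pvSweepB grid ROW COL qv cells fuel (ptr + 1) cb'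
      else (ptr, cb)

def maxPoints2_alt (grid : List (List Int)) (queries : List Int) : List Int :=
  let ROW : Int := grid.length
  let COL : Int := (grid.headD []).length
  let n : Int := ROW * COL
  let cells := PySem.List.sorted
    ((PySem.List.pyRange 0 ROW 1).flatMap (fun r =>
      (PySem.List.pyRange 0 COL 1).map (fun c => (pvCell grid r c, r, c))))
    (fun t => t.1) false
  let comp0 := PySem.List.pyRange 0 n 1
  let bucket0 := (PySem.List.pyRange 0 n 1).map (fun i => [i])
  let res0 : List Int := PySem.List.pyRepeat [0] (queries.length : Int)
  let Q := PySem.List.sorted ((PySem.List.enumerate queries).map (fun p => (p.2, p.1)))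
    (fun t => t.1) false
  let fin := Q.foldl (fun (st : Nat × List Int × (List Int × List (List Int))) q =>
    let s := pvSweepB grid ROW COL q.1 cells cells.length st.1 st.2.2
    if pvCell grid 0 0 < q.1 then
      (s.1, PySem.List.pySetD st.2.1 q.2 ((pvGetL s.2.2 (pvGetI s.2.1 0)).length : Int),
        s.2)
    else (s.1, st.2.1, s.2)) (0, res0, (comp0, bucket0))
  fin.2.1

-- ===== PRECONDITION & SPEC =====
-- Pre_ is exactly A's no-raise domain: the grid must be nonempty, every row at
-- least as long as row 0 (A indexes columns 0..len(grid[0])-1 of every row and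
-- raises IndexError on a shorter row), and if row 0 is empty A evaluates
-- grid[0][0] (IndexError) as soon as there is a query.
def Pre_maxPoints2 (grid : List (List Int)) (queries : List Int) : Prop :=
  grid ≠ [] ∧ (∀ row ∈ grid, (grid.headD []).length ≤ row.length) ∧
    ((grid.headD []).length = 0 → queries = [])
instance (grid : List (List Int)) (queries : List Int) : Decidable (Pre_maxPoints2 grid queries) := by
  unfold Pre_maxPoints2; infer_instance

def pvWitness_maxPoints2 : List (List Int) × List Int := ([[1, 2], [2, 5]], [5, 2, 1])

def Spec_maxPoints2 (grid : List (List Int)) (queries : List Int) (out : List Int) : Prop := out = maxPoints2_alt grid queries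
instance (grid : List (List Int)) (queries : List Int) (out : List Int) : Decidable (Spec_maxPoints2 grid queries out) := by unfold Spec_maxPoints2; infer_instance

-- ===== CLAIM (what is proved, stated in full; the proofs are below) =====
def Claim_equal_maxPoints2 : Prop := ∀ (grid : List (List Int)) (queries : List Int), Dom_maxPoints2 grid queries → Pre_maxPoints2 grid queries → Spec_maxPoints2 grid queries (maxPoints2 grid queries)


-- ===== LEMMAS AND PROOFS =====

-- proof-only ghost views of the two states
def pvPF (parent : List Int) (i : Nat) : Nat := (parent.getD i 0).toNat
def pvRootP (parent : List Int) (i : Nat) : Prop := parent.getD i 0 = (i : Int)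
def pvLbl (comp : List Int) (i : Nat) : Nat := (comp.getD i 0).toNat
def pvBk (bucket : List (List Int)) (l : Nat) : List Int := bucket.getD l []

-- the coupling invariant between A's union-find state and B's label/bucket state
structure PVInv (n : Nat) (parent rank comp : List Int) (bucket : List (List Int)) : Prop where
  plen : parent.length = n
  rlen : rank.length = n
  clen : comp.length = n
  blen : bucket.length = n
  pnn : ∀ i, i < n → 0 ≤ parent.getD i 0
  plt : ∀ i, i < n → pvPF parent i < n
  pcomp : ∀ i, i < n → pvLbl comp (pvPF parent i) = pvLbl comp i
  reach : ∀ i, i < n → ∃ k, pvRootP parent ((pvPF parent)^[k] i)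
  cnn : ∀ i, i < n → 0 ≤ comp.getD i 0
  clt : ∀ i, i < n → pvLbl comp i < n
  buniq : ∀ i, i < n → ∀ j, j < n → pvRootP parent i → pvRootP parent j →
    pvLbl comp i = pvLbl comp j → i = j
  bmem : ∀ i, i < n → (i : Int) ∈ pvBk bucket (pvLbl comp i)
  bsound : ∀ l, l < n → ∀ v ∈ pvBk bucket l, 0 ≤ v ∧ v.toNat < n ∧ pvLbl comp v.toNat = l
  bnodup : ∀ l, l < n → (pvBk bucket l).Nodup
  rk : ∀ i, i < n → pvRootP parent i →
    rank.getD i 0 = ((pvBk bucket (pvLbl comp i)).length : Int)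

theorem pvRoot_fixed {parent : List Int} {r : Nat} (h : pvRootP parent r) :
    pvPF parent r = r := by
  simp [pvPF, pvRootP] at *; rw [h]; simp

theorem pvStab {parent : List Int} {x k t : Nat}
    (h : pvRootP parent ((pvPF parent)^[k] x)) (ht : k ≤ t) :
    (pvPF parent)^[t] x = (pvPF parent)^[k] x := by
  obtain ⟨m, rfl⟩ := Nat.exists_eq_add_of_le ht
  rw [Nat.add_comm, Function.iterate_add_apply]
  exact Function.iterate_fixed (pvRoot_fixed h) m

theorem pvNoReturn {parent : List Int} {x k : Nat}
    (h : pvRootP parent ((pvPF parent)^[k] x)) (hnr : ¬ pvRootP parent x) :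
    ∀ j, 1 ≤ j → (pvPF parent)^[j] x ≠ x := by
  intro j hj heq
  have hk1 : 1 ≤ k := by
    rcases Nat.eq_zero_or_pos k with hk | hk
    · subst hk; exact absurd h hnr
    · exact hk
  have loop : ∀ m : Nat, (pvPF parent)^[m * j] x = x := by
    intro m
    induction m with
    | zero => simp
    | succ m ih =>
      have : (m + 1) * j = j + m * j := by ring
      rw [this, Function.iterate_add_apply, ih, heq]
  have hkj : k ≤ k * j := Nat.le_mul_of_pos_right k hj
  have := pvStab h hkj
  rw [loop k] at this
  exact hnr (this ▸ h)

theorem pvIterLt {n : Nat} {parent : List Int} (hplt : ∀ i, i < n → pvPF parent i < n)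
    {x : Nat} (hx : x < n) (k : Nat) : (pvPF parent)^[k] x < n := by
  induction k with
  | zero => simpa
  | succ k ih => rw [Function.iterate_succ_apply']; exact hplt _ ih

theorem pvLblPath {n : Nat} {parent comp : List Int}
    (hplt : ∀ i, i < n → pvPF parent i < n)
    (hpc : ∀ i, i < n → pvLbl comp (pvPF parent i) = pvLbl comp i)
    {x : Nat} (hx : x < n) (k : Nat) :
    pvLbl comp ((pvPF parent)^[k] x) = pvLbl comp x := by
  induction k with
  | zero => simp
  | succ k ih =>
    rw [Function.iterate_succ_apply', hpc _ (pvIterLt hplt hx k), ih]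

theorem pvRootSteps {n : Nat} {parent : List Int}
    (hplt : ∀ i, i < n → pvPF parent i < n) {x : Nat} (hx : x < n)
    (hr : ∃ k, pvRootP parent ((pvPF parent)^[k] x)) :
    ∃ k, k < n ∧ pvRootP parent ((pvPF parent)^[k] x) := by
  haveI : DecidablePred fun k => pvRootP parent ((pvPF parent)^[k] x) := fun k => by
    unfold pvRootP; infer_instance
  classical
  set f := pvPF parent with hf
  let k0 := Nat.find hr
  have hk0 : pvRootP parent (f^[k0] x) := Nat.find_spec hr
  refine ⟨k0, ?_, hk0⟩
  by_contra hn
  push Not at hn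
  have hinj : Function.Injective (fun j : Fin (k0 + 1) => (⟨f^[j.1] x, pvIterLt hplt hx j.1⟩ : Fin n)) := by
    intro i j hij
    simp only [Fin.mk.injEq] at hij
    by_contra hne
    -- wlog i.1 < j.1
    have key : ∀ a b : Nat, a < b → b ≤ k0 → f^[a] x = f^[b] x → False := by
      intro a b hab hbk heq
      have : f^[(k0 - b) + a] x = f^[k0] x := by
        have h1 : f^[k0] x = f^[(k0 - b) + b] x := by rw [Nat.sub_add_cancel hbk]
        rw [h1, Function.iterate_add_apply, heq, ← Function.iterate_add_apply]
      have hroot : pvRootP parent (f^[(k0 - b) + a] x) := this ▸ hk0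
      have hlt : (k0 - b) + a < k0 := by omega
      exact Nat.find_min hr hlt hroot
    rcases lt_trichotomy i.1 j.1 with h | h | h
    · exact key i.1 j.1 h (Nat.lt_succ_iff.mp j.2) hij
    · exact hne (Fin.ext h)
    · exact key j.1 i.1 h (Nat.lt_succ_iff.mp i.2) hij.symm
  have := Fintype.card_le_of_injective _ hinj
  simp at this
  omega



theorem pvGetD_set' {α : Type} {l : List α} {i : Nat} (hi : i < l.length) (v d : α) (j : Nat) :
    (l.set i v).getD j d = if i = j then v else l.getD j d := by
  by_cases h : i = j
  · subst h; simp [List.getD_eq_getElem?_getD, hi]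
  · simp [List.getD_eq_getElem?_getD, h]

theorem pvPF_set {parent : List Int} {x : Nat} (hx : x < parent.length) (v : Int) (j : Nat) :
    pvPF (parent.set x v) j = if x = j then v.toNat else pvPF parent j := by
  unfold pvPF; rw [pvGetD_set' hx]; split <;> rfl

theorem pvReachHalve {n : Nat} {parent : List Int}
    (hplt : ∀ i, i < n → pvPF parent i < n)
    {x : Nat} (hx : x < parent.length) (hnr : ¬ pvRootP parent x)
    (hnoret : ∀ j, 1 ≤ j → (pvPF parent)^[j] x ≠ x) :
    ∀ k i, i < n → pvRootP parent ((pvPF parent)^[k] i) →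
    ∃ m, pvRootP (parent.set x ((pvPF parent (pvPF parent x) : Nat) : Int))
      ((pvPF (parent.set x ((pvPF parent (pvPF parent x) : Nat) : Int)))^[m] i) := by
  have hroot' : ∀ j, j ≠ x → pvRootP parent j →
      pvRootP (parent.set x ((pvPF parent (pvPF parent x) : Nat) : Int)) j := by
    intro j hj hr
    unfold pvRootP at *
    rw [pvGetD_set' hx, if_neg (fun h => hj h.symm)]
    exact hr
  have hf' : ∀ j, j ≠ x →
      pvPF (parent.set x ((pvPF parent (pvPF parent x) : Nat) : Int)) j = pvPF parent j := by
    intro j hj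
    rw [pvPF_set hx, if_neg (fun h => hj h.symm)]
  have hf'x : pvPF (parent.set x ((pvPF parent (pvPF parent x) : Nat) : Int)) x =
      pvPF parent (pvPF parent x) := by
    rw [pvPF_set hx, if_pos rfl, Int.toNat_natCast]
  intro k
  induction k using Nat.strong_induction_on with
  | _ k IH =>
    intro i hi hri
    by_cases hr0 : pvRootP parent i
    · have hix : i ≠ x := fun h => hnr (h ▸ hr0)
      exact ⟨0, by simpa using hroot' i hix hr0⟩
    · have hk1 : 1 ≤ k := by
        rcases Nat.eq_zero_or_pos k with h | h
        · subst h; exact absurd hri hr0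
        · exact h
      by_cases hix : i = x
      · subst hix
        by_cases hk : k = 1
        · subst hk
          have hfx : pvRootP parent (pvPF parent i) := by simpa using hri
          have hgg : pvPF parent (pvPF parent i) = pvPF parent i := pvRoot_fixed hfx
          have hfix : pvPF parent i ≠ i := fun h => hnoret 1 le_rfl (by simpa using h)
          refine ⟨1, ?_⟩
          have hro := hroot' (pvPF parent i) hfix hfx
          rw [Function.iterate_one, hf'x.trans hgg]
          exact hro
        · have hk2 : 2 ≤ k := by omega
          have hgr : pvRootP parent
              ((pvPF parent)^[k - 2] (pvPF parent (pvPF parent i))) := by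
            have hkk : k = k - 2 + 2 := by omega
            rw [hkk, Function.iterate_add_apply] at hri
            have h2 : (pvPF parent)^[2] i = pvPF parent (pvPF parent i) := by
              simp [Function.iterate_succ_apply']
            rw [h2] at hri; exact hri
          have hgn : pvPF parent (pvPF parent i) < n := hplt _ (hplt _ hi)
          obtain ⟨m, hm⟩ := IH (k - 2) (by omega) _ hgn hgr
          refine ⟨m + 1, ?_⟩
          rw [Function.iterate_succ_apply, hf'x]
          exact hm
      · have hfr : pvRootP parent ((pvPF parent)^[k - 1] (pvPF parent i)) := by
          have hkk : k = k - 1 + 1 := by omega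
          rw [hkk, Function.iterate_succ_apply] at hri
          exact hri
        obtain ⟨m, hm⟩ := IH (k - 1) (by omega) _ (hplt _ hi) hfr
        refine ⟨m + 1, ?_⟩
        rw [Function.iterate_succ_apply, hf' i hix]
        exact hm

theorem pvHalve {n : Nat} {parent rank comp : List Int} {bucket : List (List Int)}
    (hInv : PVInv n parent rank comp bucket) {x : Nat} (hx : x < n)
    (hnr : ¬ pvRootP parent x) :
    PVInv n (parent.set x ((pvPF parent (pvPF parent x) : Nat) : Int)) rank comp bucket ∧
    (∀ i, pvRootP (parent.set x ((pvPF parent (pvPF parent x) : Nat) : Int)) i ↔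
      pvRootP parent i) := by
  have hxl : x < parent.length := hInv.plen ▸ hx
  have hnoret : ∀ j, 1 ≤ j → (pvPF parent)^[j] x ≠ x := by
    obtain ⟨k, hk⟩ := hInv.reach x hx
    exact pvNoReturn hk hnr
  have hgx : pvPF parent (pvPF parent x) ≠ x := by
    have h2 : (pvPF parent)^[2] x = pvPF parent (pvPF parent x) := by
      simp [Function.iterate_succ_apply']
    exact h2 ▸ hnoret 2 (by omega)
  have hgd : ∀ j, (parent.set x ((pvPF parent (pvPF parent x) : Nat) : Int)).getD j 0 =
      if x = j then ((pvPF parent (pvPF parent x) : Nat) : Int) else parent.getD j 0 :=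
    fun j => pvGetD_set' hxl _ _ j
  have hroots : ∀ i, pvRootP (parent.set x ((pvPF parent (pvPF parent x) : Nat) : Int)) i ↔
      pvRootP parent i := by
    intro i
    unfold pvRootP
    rw [hgd i]
    by_cases h : x = i
    · subst h
      rw [if_pos rfl]
      constructor
      · intro h; exact absurd (by exact_mod_cast h) hgx
      · intro h; exact absurd h hnr
    · rw [if_neg h]
  have hpf' : ∀ j, pvPF (parent.set x ((pvPF parent (pvPF parent x) : Nat) : Int)) j =
      if x = j then pvPF parent (pvPF parent x) else pvPF parent j := by
    intro j; rw [pvPF_set hxl]; split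
    · exact Int.toNat_natCast _
    · rfl
  refine ⟨⟨?_, hInv.rlen, hInv.clen, hInv.blen, ?_, ?_, ?_, ?_, hInv.cnn, hInv.clt,
    ?_, hInv.bmem, hInv.bsound, hInv.bnodup, ?_⟩, hroots⟩
  · simpa using hInv.plen
  · intro i hi; rw [hgd i]; split
    · positivity
    · exact hInv.pnn i hi
  · intro i hi; rw [hpf' i]; split
    · exact hInv.plt _ (hInv.plt _ hx)
    · exact hInv.plt i hi
  · intro i hi; rw [hpf' i]; split
    · rename_i h
      rw [← h, hInv.pcomp _ (hInv.plt _ hx), hInv.pcomp _ hx]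
    · exact hInv.pcomp i hi
  · intro i hi
    obtain ⟨k, hk⟩ := hInv.reach i hi
    exact pvReachHalve hInv.plt hxl hnr hnoret k i hi hk
  · intro i hi j hj h1 h2 h3
    exact hInv.buniq i hi j hj ((hroots i).mp h1) ((hroots j).mp h2) h3
  · intro i hi h1
    exact hInv.rk i hi ((hroots i).mp h1)

theorem pvUFFind_spec {n : Nat} {rank comp : List Int} {bucket : List (List Int)} :
    ∀ (k : Nat) (parent : List Int) (x fuel : Nat),
    PVInv n parent rank comp bucket → x < n →
    pvRootP parent ((pvPF parent)^[k] x) → k < fuel →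
    ∃ parent',
      pvUFFind fuel parent (x : Int) = ((((pvPF parent)^[k] x : Nat) : Int), parent') ∧
      PVInv n parent' rank comp bucket ∧
      (∀ i, pvRootP parent' i ↔ pvRootP parent i) := by
  intro k
  induction k using Nat.strong_induction_on with
  | _ k IH =>
    intro parent x fuel hInv hx hroot hfuel
    obtain ⟨m, rfl⟩ : ∃ m, fuel = m + 1 := ⟨fuel - 1, by omega⟩
    by_cases hr0 : pvRootP parent x
    · have hfix : (pvPF parent)^[k] x = x := Function.iterate_fixed (pvRoot_fixed hr0) k
      refine ⟨parent, ?_, hInv, fun i => Iff.rfl⟩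
      rw [hfix]
      have hcond : (x : Int) = pvGetI parent ↑x := by
        unfold pvGetI; rw [Int.toNat_natCast]; exact hr0.symm
      simp only [pvUFFind]
      rw [if_pos hcond]
    · have hxl : x < parent.length := hInv.plen ▸ hx
      have hk1 : 1 ≤ k := by
        rcases Nat.eq_zero_or_pos k with h | h
        · subst h; exact absurd hroot hr0
        · exact h
      have hm1 : 1 ≤ m := by omega
      have hnoret : ∀ j, 1 ≤ j → (pvPF parent)^[j] x ≠ x := by
        obtain ⟨kk, hkk⟩ := hInv.reach x hx
        exact pvNoReturn hkk hr0
      have hpx : pvGetI parent ↑x = parent.getD x 0 := by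
        unfold pvGetI; rw [Int.toNat_natCast]
      have hne : ¬((x : Int) = pvGetI parent ↑x) := by
        rw [hpx]; intro h; exact hr0 h.symm
      have hpxv : pvGetI parent ↑x = ((pvPF parent x : Nat) : Int) := by
        rw [hpx]; unfold pvPF; rw [Int.toNat_of_nonneg (hInv.pnn x hx)]
      have hgx : pvGetI parent (pvGetI parent ↑x) =
          ((pvPF parent (pvPF parent x) : Nat) : Int) := by
        rw [hpxv]; unfold pvGetI; rw [Int.toNat_natCast]; unfold pvPF
        exact (Int.toNat_of_nonneg (hInv.pnn _ (hInv.plt x hx))).symm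
      obtain ⟨hInv', hroots'⟩ := pvHalve hInv hx hr0
      have hpf'off : ∀ y, y ≠ x →
          pvPF (parent.set x ((pvPF parent (pvPF parent x) : Nat) : Int)) y =
          pvPF parent y := by
        intro y hy
        rw [pvPF_set hxl, if_neg (fun h => hy h.symm)]
      have h2iter : (pvPF parent)^[2] x = pvPF parent (pvPF parent x) := by
        simp [Function.iterate_succ_apply']
      -- the recursion's new target and witness
      by_cases hk' : k = 1
      · subst hk'
        have hfx : pvRootP parent (pvPF parent x) := by simpa using hroot
        have hgg : pvPF parent (pvPF parent x) = pvPF parent x := pvRoot_fixed hfx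
        have hfxx : pvPF parent x ≠ x := fun h => hnoret 1 le_rfl (by simpa using h)
        have hrootg : pvRootP parent (pvPF parent (pvPF parent x)) := by
          rw [hgg]; exact hfx
        have hroot'' : pvRootP (parent.set x ((pvPF parent (pvPF parent x) : Nat) : Int))
            ((pvPF (parent.set x ((pvPF parent (pvPF parent x) : Nat) : Int)))^[0]
              (pvPF parent (pvPF parent x))) := by
          simp only [Function.iterate_zero, id_eq]
          exact (hroots' _).mpr hrootg
        obtain ⟨parent'', heq, hInv'', hroots''⟩ :=
          IH 0 (by omega) _ (pvPF parent (pvPF parent x))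
            m hInv' (hInv.plt _ (hInv.plt _ hx)) hroot'' (by omega)
        refine ⟨parent'', ?_, hInv'', fun i => (hroots'' i).trans (hroots' i)⟩
        simp only [pvUFFind]
        rw [if_neg hne, hgx, Int.toNat_natCast]
        rw [heq]
        simp only [Function.iterate_zero, id_eq, Function.iterate_one, hgg]
      · have hk2 : 2 ≤ k := by omega
        have hshift : ∀ j, j + 2 ≤ k →
            (pvPF (parent.set x ((pvPF parent (pvPF parent x) : Nat) : Int)))^[j]
              (pvPF parent (pvPF parent x)) = (pvPF parent)^[j + 2] x := by
          intro j
          induction j with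
          | zero => intro _; simp [h2iter]
          | succ j ihj =>
            intro hj
            rw [Function.iterate_succ_apply', ihj (by omega)]
            have hny : (pvPF parent)^[j + 2] x ≠ x := hnoret (j + 2) (by omega)
            rw [hpf'off _ hny]
            exact (Function.iterate_succ_apply' (pvPF parent) (j + 2) x).symm
        have hroot'' : pvRootP (parent.set x ((pvPF parent (pvPF parent x) : Nat) : Int))
            ((pvPF (parent.set x ((pvPF parent (pvPF parent x) : Nat) : Int)))^[k - 2]
              (pvPF parent (pvPF parent x))) := by
          rw [hshift (k - 2) (by omega)]
          have hkk : k - 2 + 2 = k := by omega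
          rw [hkk]
          exact (hroots' _).mpr hroot
        obtain ⟨parent'', heq, hInv'', hroots''⟩ :=
          IH (k - 2) (by omega) _ (pvPF parent (pvPF parent x))
            m hInv' (hInv.plt _ (hInv.plt _ hx)) hroot'' (by omega)
        refine ⟨parent'', ?_, hInv'', fun i => (hroots'' i).trans (hroots' i)⟩
        simp only [pvUFFind]
        rw [if_neg hne, hgx, Int.toNat_natCast]
        rw [heq, hshift (k - 2) (by omega)]
        have hkk : k - 2 + 2 = k := by omega
        rw [hkk]

theorem pvFind_spec {n : Nat} {comp : List Int} {bucket : List (List Int)} (uf : PVUF)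
    (hInv : PVInv n uf.parent uf.rank comp bucket) {x : Nat} (hx : x < n) :
    ∃ (r : Nat) (uf' : PVUF),
      pvFind uf (x : Int) = (((r : Nat) : Int), uf') ∧
      uf'.rank = uf.rank ∧ uf'.n = uf.n ∧ uf'.part = uf.part ∧
      PVInv n uf'.parent uf'.rank comp bucket ∧
      r < n ∧ pvRootP uf'.parent r ∧
      pvLbl comp r = pvLbl comp x ∧
      (∀ i, pvRootP uf'.parent i ↔ pvRootP uf.parent i) := by
  obtain ⟨k, hkn, hk⟩ := pvRootSteps hInv.plt hx (hInv.reach x hx)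
  have hfuel : k < uf.parent.length := by rw [hInv.plen]; exact hkn
  obtain ⟨parent', heq, hInv', hroots⟩ :=
    pvUFFind_spec k uf.parent x uf.parent.length hInv hx hk hfuel
  refine ⟨(pvPF uf.parent)^[k] x, { uf with parent := parent' }, ?_, rfl, rfl, rfl, ?_, ?_, ?_, ?_, ?_⟩
  · simp only [pvFind, heq]
  · exact hInv'
  · exact pvIterLt hInv.plt hx k
  · exact (hroots _).mpr hk
  · exact pvLblPath hInv.plt hInv.pcomp hx k
  · exact hroots

theorem pvPySetD_set {α : Type} (xs : List α) (i : Int) (v : α) (h0 : 0 ≤ i)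
    (hl : i.toNat < xs.length) : PySem.List.pySetD xs i v = xs.set i.toNat v := by
  obtain ⟨m, rfl⟩ : ∃ m : Nat, i = (m : Int) := ⟨i.toNat, (Int.toNat_of_nonneg h0).symm⟩
  rw [Int.toNat_natCast] at hl ⊢
  unfold PySem.List.pySetD
  rw [PySem.List.pySet?_natCast xs m v hl]
  rfl

theorem pvSetMany {b : Int} : ∀ (vs : List Int) (c : List Int),
    (∀ v ∈ vs, 0 ≤ v ∧ v.toNat < c.length) →
    (vs.foldl (fun c v => PySem.List.pySetD c v b) c).length = c.length ∧
    ∀ j : Nat, (vs.foldl (fun c v => PySem.List.pySetD c v b) c).getD j 0 =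
      if (j : Int) ∈ vs then b else c.getD j 0 := by
  intro vs
  induction vs with
  | nil => intro c _; exact ⟨rfl, fun j => by simp⟩
  | cons v rest ih =>
    intro c hb
    obtain ⟨hv0, hvl⟩ := hb v (List.mem_cons_self)
    have hset : PySem.List.pySetD c v b = c.set v.toNat b := pvPySetD_set c v b hv0 hvl
    have hlen1 : (PySem.List.pySetD c v b).length = c.length := by rw [hset]; simp
    have hb' : ∀ w ∈ rest, 0 ≤ w ∧ w.toNat < (PySem.List.pySetD c v b).length := by
      intro w hw; rw [hlen1]; exact hb w (List.mem_cons_of_mem _ hw)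
    obtain ⟨ihl, ihg⟩ := ih (PySem.List.pySetD c v b) hb'
    refine ⟨by rw [List.foldl_cons, ihl, hlen1], ?_⟩
    intro j
    rw [List.foldl_cons, ihg j]
    by_cases hjr : (j : Int) ∈ rest
    · simp [hjr]
    · rw [if_neg hjr, hset, pvGetD_set' hvl]
      by_cases hjv : (j : Int) = v
      · have hvj : v.toNat = j := by omega
        simp [hvj, hjv]
      · have hvj : v.toNat ≠ j := fun h => hjv (by omega)
        simp [hvj, hjv, hjr]

theorem pvMemBk {n : Nat} {parent rank comp : List Int} {bucket : List (List Int)}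
    (hInv : PVInv n parent rank comp bucket) {j l : Nat} (hj : j < n) (hl : l < n) :
    (j : Int) ∈ pvBk bucket l ↔ pvLbl comp j = l := by
  constructor
  · intro h
    have hh := (hInv.bsound l hl _ h).2.2
    rwa [Int.toNat_natCast] at hh
  · intro h
    exact h ▸ hInv.bmem j hj

theorem pvMerge {n : Nat} {parent rank comp : List Int} {bucket : List (List Int)}
    (hInv : PVInv n parent rank comp bucket) {rA rB la lb : Nat}
    (hrA : rA < n) (hrB : rB < n)
    (hrootA : pvRootP parent rA) (hrootB : pvRootP parent rB)
    (hla : pvLbl comp rA = la) (hlb : pvLbl comp rB = lb) (hne : la ≠ lb) :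
    PVInv n (parent.set rA ((rB : Nat) : Int))
      (rank.set rB (rank.getD rB 0 + rank.getD rA 0))
      ((pvBk bucket la).foldl (fun c v => PySem.List.pySetD c v ((lb : Nat) : Int)) comp)
      (PySem.List.pySetD
        (PySem.List.pySetD bucket ((lb : Nat) : Int) (pvBk bucket lb ++ pvBk bucket la))
        ((la : Nat) : Int) []) := by
  have hlan : la < n := hla ▸ hInv.clt rA hrA
  have hlbn : lb < n := hlb ▸ hInv.clt rB hrB
  have hAB : rA ≠ rB := fun h => hne (hla ▸ hlb ▸ h ▸ rfl)
  have hrAl : rA < parent.length := hInv.plen ▸ hrA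
  have hrBl : rB < rank.length := hInv.rlen ▸ hrB
  have hlal : la < bucket.length := hInv.blen ▸ hlan
  have hlbl : lb < bucket.length := hInv.blen ▸ hlbn
  have hmv : ∀ v ∈ pvBk bucket la, 0 ≤ v ∧ v.toNat < comp.length := by
    intro v hv
    obtain ⟨h0, h1, _⟩ := hInv.bsound la hlan v hv
    exact ⟨h0, hInv.clen ▸ h1⟩
  obtain ⟨hclen, hcget⟩ := pvSetMany (pvBk bucket la) comp hmv
  have hlbl' : ∀ j : Nat, j < n →
      pvLbl ((pvBk bucket la).foldl (fun c v => PySem.List.pySetD c v ((lb : Nat) : Int)) comp) j =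
      if pvLbl comp j = la then lb else pvLbl comp j := by
    intro j hj
    by_cases hmem : (j : Int) ∈ pvBk bucket la
    · rw [if_pos ((pvMemBk hInv hj hlan).mp hmem)]
      unfold pvLbl
      rw [hcget j, if_pos hmem, Int.toNat_natCast]
    · rw [if_neg (fun h => hmem ((pvMemBk hInv hj hlan).mpr h))]
      unfold pvLbl
      rw [hcget j, if_neg hmem]
  have hcnn' : ∀ j : Nat, j < n →
      0 ≤ ((pvBk bucket la).foldl (fun c v => PySem.List.pySetD c v ((lb : Nat) : Int)) comp).getD j 0 := by
    intro j hj
    rw [hcget j]; split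
    · positivity
    · exact hInv.cnn j hj
  have hb1 : PySem.List.pySetD bucket ((lb : Nat) : Int) (pvBk bucket lb ++ pvBk bucket la) =
      bucket.set lb (pvBk bucket lb ++ pvBk bucket la) := by
    have hh := pvPySetD_set bucket ((lb : Nat) : Int) (pvBk bucket lb ++ pvBk bucket la)
      (by positivity) (by rwa [Int.toNat_natCast])
    rwa [Int.toNat_natCast] at hh
  have hb1len : (bucket.set lb (pvBk bucket lb ++ pvBk bucket la)).length = bucket.length := by simp
  have hb2 : PySem.List.pySetD (bucket.set lb (pvBk bucket lb ++ pvBk bucket la)) ((la : Nat) : Int) [] =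
      (bucket.set lb (pvBk bucket lb ++ pvBk bucket la)).set la [] := by
    have hh := pvPySetD_set (bucket.set lb (pvBk bucket lb ++ pvBk bucket la)) ((la : Nat) : Int) []
      (by positivity) (by rw [Int.toNat_natCast, hb1len]; exact hlal)
    rwa [Int.toNat_natCast] at hh
  have hbget : ∀ l : Nat, pvBk (PySem.List.pySetD
      (PySem.List.pySetD bucket ((lb : Nat) : Int) (pvBk bucket lb ++ pvBk bucket la))
      ((la : Nat) : Int) []) l =
      if l = la then [] else if l = lb then pvBk bucket lb ++ pvBk bucket la else pvBk bucket l := by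
    intro l
    rw [hb1, hb2]
    unfold pvBk
    rw [pvGetD_set' (hb1len ▸ hlal), pvGetD_set' hlbl]
    by_cases h1 : l = la
    · rw [if_pos h1.symm, if_pos h1]
    · rw [if_neg (fun h => h1 h.symm), if_neg h1]
      by_cases h2 : l = lb
      · rw [if_pos h2.symm, if_pos h2]
      · rw [if_neg (fun h => h2 h.symm), if_neg h2]
  have hblen : (PySem.List.pySetD
      (PySem.List.pySetD bucket ((lb : Nat) : Int) (pvBk bucket lb ++ pvBk bucket la))
      ((la : Nat) : Int) []).length = bucket.length := by
    rw [hb1, hb2]; simp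
  have hpget : ∀ j : Nat, (parent.set rA ((rB : Nat) : Int)).getD j 0 =
      if rA = j then ((rB : Nat) : Int) else parent.getD j 0 := fun j => pvGetD_set' hrAl _ _ j
  have hpf : ∀ j : Nat, pvPF (parent.set rA ((rB : Nat) : Int)) j =
      if rA = j then rB else pvPF parent j := by
    intro j; rw [pvPF_set hrAl]; split
    · exact Int.toNat_natCast _
    · rfl
  have hroots : ∀ j : Nat, pvRootP (parent.set rA ((rB : Nat) : Int)) j ↔
      pvRootP parent j ∧ j ≠ rA := by
    intro j
    unfold pvRootP
    rw [hpget j]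
    by_cases h : rA = j
    · subst h
      rw [if_pos rfl]
      constructor
      · intro h; exact absurd (by exact_mod_cast h) (Ne.symm hAB)
      · intro h; exact absurd rfl h.2
    · rw [if_neg h]
      exact ⟨fun hh => ⟨hh, fun hj => h hj.symm⟩, fun hh => hh.1⟩
  have hrget : ∀ j : Nat, (rank.set rB (rank.getD rB 0 + rank.getD rA 0)).getD j 0 =
      if rB = j then rank.getD rB 0 + rank.getD rA 0 else rank.getD j 0 :=
    fun j => pvGetD_set' hrBl _ _ j
  have hlblroot : ∀ i : Nat, i < n → pvRootP parent i → i ≠ rA → pvLbl comp i ≠ la := by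
    intro i hi hr hia hcon
    exact hia (hInv.buniq i hi rA hrA hr hrootA (hcon.trans hla.symm))
  have hlblrootB : ∀ i : Nat, i < n → pvRootP parent i → i ≠ rB → pvLbl comp i ≠ lb := by
    intro i hi hr hib hcon
    exact hib (hInv.buniq i hi rB hrB hr hrootB (hcon.trans hlb.symm))
  constructor
  case plen => simpa using hInv.plen
  case rlen => simpa using hInv.rlen
  case clen => rw [hclen]; exact hInv.clen
  case blen => rw [hblen]; exact hInv.blen
  case pnn =>
    intro i hi; rw [hpget i]; split
    · positivity
    · exact hInv.pnn i hi
  case plt =>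
    intro i hi; rw [hpf i]; split
    · exact hrB
    · exact hInv.plt i hi
  case pcomp =>
    intro i hi
    rw [hpf i]
    by_cases h : rA = i
    · rw [if_pos h, hlbl' rB hrB, hlbl' i (h ▸ hrA), ← h, hla, hlb,
        if_neg (fun hh : lb = la => hne hh.symm), if_pos rfl]
    · rw [if_neg h, hlbl' _ (hInv.plt i hi), hlbl' i hi, hInv.pcomp i hi]
  case reach =>
    intro i0 hi0
    obtain ⟨k', hk'⟩ := hInv.reach i0 hi0
    revert hk'
    suffices hsuf : ∀ k i, i < n → pvRootP parent ((pvPF parent)^[k] i) →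
        ∃ m, pvRootP (parent.set rA ((rB : Nat) : Int))
          ((pvPF (parent.set rA ((rB : Nat) : Int)))^[m] i) by
      intro hki; exact hsuf k' i0 hi0 hki
    intro k
    induction k using Nat.strong_induction_on with
    | _ k IH =>
      intro i hi hri
      by_cases hr0 : pvRootP parent i
      · by_cases hia : i = rA
        · subst hia
          refine ⟨1, ?_⟩
          rw [Function.iterate_one, hpf, if_pos rfl]
          exact (hroots rB).mpr ⟨hrootB, Ne.symm hAB⟩
        · exact ⟨0, by simpa using (hroots i).mpr ⟨hr0, hia⟩⟩
      · have hk1 : 1 ≤ k := by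
          rcases Nat.eq_zero_or_pos k with h | h
          · subst h; exact absurd hri hr0
          · exact h
        have hia : i ≠ rA := fun h => hr0 (h ▸ hrootA)
        have hfr : pvRootP parent ((pvPF parent)^[k - 1] (pvPF parent i)) := by
          have hkk : k = k - 1 + 1 := by omega
          rw [hkk, Function.iterate_succ_apply] at hri
          exact hri
        obtain ⟨m, hm⟩ := IH (k - 1) (by omega) (pvPF parent i) (hInv.plt i hi) hfr
        refine ⟨m + 1, ?_⟩
        rw [Function.iterate_succ_apply, hpf, if_neg (fun h => hia h.symm)]
        exact hm
  case cnn => exact hcnn'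
  case clt =>
    intro i hi
    rw [hlbl' i hi]; split
    · exact hlbn
    · exact hInv.clt i hi
  case buniq =>
    intro i hi j hj h1 h2 h3
    obtain ⟨h1r, h1a⟩ := (hroots i).mp h1
    obtain ⟨h2r, h2a⟩ := (hroots j).mp h2
    rw [hlbl' i hi, if_neg (hlblroot i hi h1r h1a),
      hlbl' j hj, if_neg (hlblroot j hj h2r h2a)] at h3
    exact hInv.buniq i hi j hj h1r h2r h3
  case bmem =>
    intro i hi
    rw [hlbl' i hi, hbget]
    by_cases h1 : pvLbl comp i = la
    · rw [if_pos h1, if_neg (fun h : lb = la => hne h.symm), if_pos rfl]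
      exact List.mem_append_right _ ((pvMemBk hInv hi hlan).mpr h1)
    · rw [if_neg h1]
      by_cases h2 : pvLbl comp i = lb
      · rw [h2, if_neg (fun h => hne h.symm), if_pos rfl]
        exact List.mem_append_left _ ((pvMemBk hInv hi hlbn).mpr h2)
      · rw [if_neg h1, if_neg h2]
        exact hInv.bmem i hi
  case bsound =>
    intro l hl v hv
    rw [hbget] at hv
    by_cases h1 : l = la
    · rw [if_pos h1] at hv; exact absurd hv List.not_mem_nil
    · rw [if_neg h1] at hv
      by_cases h2 : l = lb
      · rw [if_pos h2] at hv
        rcases List.mem_append.mp hv with hv' | hv'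
        · obtain ⟨hv0, hv1, hv2⟩ := hInv.bsound lb hlbn v hv'
          refine ⟨hv0, hv1, ?_⟩
          rw [hlbl' _ hv1, if_neg (fun hc => hne (hv2.symm.trans hc).symm), hv2, h2]
        · obtain ⟨hv0, hv1, hv2⟩ := hInv.bsound la hlan v hv'
          refine ⟨hv0, hv1, ?_⟩
          rw [hlbl' _ hv1, if_pos hv2, h2]
      · rw [if_neg h2] at hv
        obtain ⟨hv0, hv1, hv2⟩ := hInv.bsound l hl v hv
        refine ⟨hv0, hv1, ?_⟩
        rw [hlbl' _ hv1, if_neg (fun hc => h1 (hv2.symm.trans hc)), hv2]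
  case bnodup =>
    intro l hl
    rw [hbget]
    by_cases h1 : l = la
    · simp [h1]
    · rw [if_neg h1]
      by_cases h2 : l = lb
      · rw [if_pos h2]
        refine List.Nodup.append (hInv.bnodup lb hlbn) (hInv.bnodup la hlan) ?_
        intro v hv1 hv2
        have e1 := (hInv.bsound lb hlbn v hv1).2.2
        have e2 := (hInv.bsound la hlan v hv2).2.2
        exact hne (e2.symm.trans e1)
      · rw [if_neg h2]; exact hInv.bnodup l hl
  case rk =>
    intro i hi hri
    obtain ⟨hir, hia⟩ := (hroots i).mp hri
    rw [hrget i]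
    by_cases hib : rB = i
    · rw [if_pos hib, ← hib, hlbl' rB hrB, hlb, if_neg (fun h : lb = la => hne h.symm), hbget,
        if_neg (fun h : lb = la => hne h.symm), if_pos rfl,
        hInv.rk rB hrB hrootB, hInv.rk rA hrA hrootA, hla, hlb]
      push_cast [List.length_append]
      ring
    · rw [if_neg hib]
      have hnla : pvLbl comp i ≠ la := hlblroot i hi hir hia
      have hnlb : pvLbl comp i ≠ lb := hlblrootB i hi hir (fun h => hib h.symm)
      rw [hlbl' i hi, if_neg hnla, hbget, if_neg hnla, if_neg hnlb]
      exact hInv.rk i hi hir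

theorem pvUnionRelabel {n : Nat} (uf : PVUF) (comp : List Int) (bucket : List (List Int))
    (hInv : PVInv n uf.parent uf.rank comp bucket) {x y : Nat} (hx : x < n) (hy : y < n) :
    PVInv n (pvUnion uf (x : Int) (y : Int)).2.parent (pvUnion uf (x : Int) (y : Int)).2.rank
      (pvRelabel comp bucket (x : Int) (y : Int)).1
      (pvRelabel comp bucket (x : Int) (y : Int)).2 := by
  obtain ⟨rX, uf1, heq1, hrk1, hn1, hp1, hInv1, hrXn, hrootX1, hlblX, hroots1⟩ :=
    pvFind_spec uf hInv hx
  obtain ⟨rY, uf2, heq2, hrk2, hn2, hp2, hInv2, hrYn, hrootY2, hlblY, hroots2⟩ :=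
    pvFind_spec uf1 hInv1 hy
  have hrootX2 : pvRootP uf2.parent rX := (hroots2 rX).mpr hrootX1
  have hiff : rX = rY ↔ pvLbl comp x = pvLbl comp y := by
    constructor
    · intro h; rw [← hlblX, ← hlblY, h]
    · intro h
      exact hInv2.buniq rX hrXn rY hrYn hrootX2 hrootY2 (by rw [hlblX, hlblY, h])
  have ha : pvGetI comp (x : Int) = ((pvLbl comp x : Nat) : Int) := by
    unfold pvGetI pvLbl; rw [Int.toNat_natCast]
    exact (Int.toNat_of_nonneg (hInv.cnn x hx)).symm
  have hb : pvGetI comp (y : Int) = ((pvLbl comp y : Nat) : Int) := by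
    unfold pvGetI pvLbl; rw [Int.toNat_natCast]
    exact (Int.toNat_of_nonneg (hInv.cnn y hy)).symm
  have hga : pvGetL bucket ((pvLbl comp x : Nat) : Int) = pvBk bucket (pvLbl comp x) := by
    unfold pvGetL pvBk; rw [Int.toNat_natCast]
  have hgb : pvGetL bucket ((pvLbl comp y : Nat) : Int) = pvBk bucket (pvLbl comp y) := by
    unfold pvGetL pvBk; rw [Int.toNat_natCast]
  have hrkX : pvGetI uf2.rank ((rX : Nat) : Int) =
      ((pvBk bucket (pvLbl comp x)).length : Int) := by
    have h := hInv2.rk rX hrXn hrootX2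
    rw [hlblX] at h
    unfold pvGetI; rw [Int.toNat_natCast]; exact h
  have hrkY : pvGetI uf2.rank ((rY : Nat) : Int) =
      ((pvBk bucket (pvLbl comp y)).length : Int) := by
    have h := hInv2.rk rY hrYn hrootY2
    rw [hlblY] at h
    unfold pvGetI; rw [Int.toNat_natCast]; exact h
  by_cases hsame : pvLbl comp x = pvLbl comp y
  · have hrXY : ((rX : Nat) : Int) = ((rY : Nat) : Int) := by
      exact_mod_cast hiff.mpr hsame
    have hab : ((pvLbl comp x : Nat) : Int) = ((pvLbl comp y : Nat) : Int) := by
      exact_mod_cast hsame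
    simp only [pvUnion, pvRelabel, heq1, heq2]
    rw [ha, hb, if_pos hrXY, if_pos hab]
    exact hInv2
  · have hcne : ¬ ((rX : Nat) : Int) = ((rY : Nat) : Int) := by
      intro h; exact hsame (hiff.mp (by exact_mod_cast h))
    have habne : ¬ ((pvLbl comp x : Nat) : Int) = ((pvLbl comp y : Nat) : Int) := by
      intro h; exact hsame (by exact_mod_cast h)
    by_cases hgt : (pvBk bucket (pvLbl comp y)).length < (pvBk bucket (pvLbl comp x)).length
    · have hgtI : pvGetI uf2.rank ((rY : Nat) : Int) < pvGetI uf2.rank ((rX : Nat) : Int) := by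
        rw [hrkX, hrkY]; exact_mod_cast hgt
      simp only [pvUnion, pvRelabel, heq1, heq2]
      rw [ha, hb, if_neg hcne, if_neg habne, if_pos hgtI, hga, hgb]
      rw [if_pos hgt]
      simp only [Int.toNat_natCast]
      have hrget : ∀ r : Nat, pvGetI uf2.rank ((r : Nat) : Int) = uf2.rank.getD r 0 := by
        intro r; unfold pvGetI; rw [Int.toNat_natCast]
      rw [hrget, hrget]
      exact pvMerge hInv2 hrYn hrXn hrootY2 hrootX2 hlblY hlblX (fun h => hsame h.symm)
    · have hgtI : ¬ pvGetI uf2.rank ((rY : Nat) : Int) < pvGetI uf2.rank ((rX : Nat) : Int) := by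
        rw [hrkX, hrkY]; intro h; exact hgt (by exact_mod_cast h)
      simp only [pvUnion, pvRelabel, heq1, heq2]
      rw [ha, hb, if_neg hcne, if_neg habne, if_neg hgtI, hga, hgb]
      rw [if_neg (by omega : ¬ (pvBk bucket (pvLbl comp y)).length < (pvBk bucket (pvLbl comp x)).length)]
      simp only [Int.toNat_natCast]
      have hrget : ∀ r : Nat, pvGetI uf2.rank ((r : Nat) : Int) = uf2.rank.getD r 0 := by
        intro r; unfold pvGetI; rw [Int.toNat_natCast]
      rw [hrget, hrget]
      exact pvMerge hInv2 hrXn hrYn hrootX2 hrootY2 hlblX hlblY hsame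

theorem pvNums0_eq (grid : List (List Int)) (ROW COL : Int) :
    (PySem.List.pyRange 0 ROW 1).foldl (fun acc r =>
      (PySem.List.pyRange 0 COL 1).foldl (fun acc c =>
        acc ++ [(pvCell grid r c, r, c)]) acc) [] =
    (PySem.List.pyRange 0 ROW 1).flatMap (fun r =>
      (PySem.List.pyRange 0 COL 1).map (fun c => (pvCell grid r c, r, c))) := by
  have hin : ∀ (acc : List (Int × Int × Int)) (r : Int),
      (PySem.List.pyRange 0 COL 1).foldl (fun acc c =>
        acc ++ [(pvCell grid r c, r, c)]) acc =
      acc ++ (PySem.List.pyRange 0 COL 1).map (fun c => (pvCell grid r c, r, c)) := by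
    intro acc r
    exact PySem.List.foldl_append_singleton_eq_map _ _ _
  have hcongr : (PySem.List.pyRange 0 ROW 1).foldl (fun acc r =>
      (PySem.List.pyRange 0 COL 1).foldl (fun acc c =>
        acc ++ [(pvCell grid r c, r, c)]) acc) [] =
      (PySem.List.pyRange 0 ROW 1).foldl (fun acc r =>
        acc ++ (PySem.List.pyRange 0 COL 1).map (fun c => (pvCell grid r c, r, c))) [] := by
    apply PySem.List.foldl_congr_mem
    intro acc r _
    exact hin acc r
  rw [hcongr, PySem.List.foldl_append_eq_flatMap]
  rfl

theorem pvIdLt {R C : Nat} {r c : Int} (h1 : 0 ≤ r) (h2 : r < (R : Int))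
    (h3 : 0 ≤ c) (h4 : c < (C : Int)) :
    ∃ idx : Nat, r * (C : Int) + c = (idx : Int) ∧ idx < R * C := by
  have h0 : 0 ≤ r * (C : Int) + c := by
    have : 0 ≤ r * (C : Int) := mul_nonneg h1 (by positivity)
    omega
  have hlt : r * (C : Int) + c < ((R * C : Nat) : Int) := by
    push_cast
    nlinarith
  refine ⟨(r * (C : Int) + c).toNat, (Int.toNat_of_nonneg h0).symm, ?_⟩
  omega

theorem pvStep_lock {grid : List (List Int)} {R C : Nat} {qv : Int} {r c : Int}
    (h1 : 0 ≤ r) (h2 : r < (R : Int)) (h3 : 0 ≤ c) (h4 : c < (C : Int)) :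
    ∀ (ds : List (Int × Int)) (uf : PVUF) (comp : List Int) (bucket : List (List Int)),
    PVInv (R * C) uf.parent uf.rank comp bucket →
    PVInv (R * C)
      (ds.foldl (fun uf d =>
        if 0 ≤ r + d.1 ∧ r + d.1 < (R : Int) ∧ 0 ≤ c + d.2 ∧ c + d.2 < (C : Int) ∧
            pvCell grid (r + d.1) (c + d.2) < qv then
          (pvUnion uf (r * (C : Int) + c) ((r + d.1) * (C : Int) + (c + d.2))).2
        else uf) uf).parent
      ((ds.foldl (fun uf d =>
        if 0 ≤ r + d.1 ∧ r + d.1 < (R : Int) ∧ 0 ≤ c + d.2 ∧ c + d.2 < (C : Int) ∧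
            pvCell grid (r + d.1) (c + d.2) < qv then
          (pvUnion uf (r * (C : Int) + c) ((r + d.1) * (C : Int) + (c + d.2))).2
        else uf) uf).rank)
      ((ds.foldl (fun cb d =>
        if 0 ≤ r + d.1 ∧ r + d.1 < (R : Int) ∧ 0 ≤ c + d.2 ∧ c + d.2 < (C : Int) ∧
            pvCell grid (r + d.1) (c + d.2) < qv then
          pvRelabel cb.1 cb.2 (r * (C : Int) + c) ((r + d.1) * (C : Int) + (c + d.2))
        else cb) (comp, bucket)).1)
      ((ds.foldl (fun cb d =>
        if 0 ≤ r + d.1 ∧ r + d.1 < (R : Int) ∧ 0 ≤ c + d.2 ∧ c + d.2 < (C : Int) ∧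
            pvCell grid (r + d.1) (c + d.2) < qv then
          pvRelabel cb.1 cb.2 (r * (C : Int) + c) ((r + d.1) * (C : Int) + (c + d.2))
        else cb) (comp, bucket)).2) := by
  intro ds
  induction ds with
  | nil => intro uf comp bucket h; exact h
  | cons d ds ih =>
    intro uf comp bucket hInv
    rw [List.foldl_cons, List.foldl_cons]
    by_cases hcond : 0 ≤ r + d.1 ∧ r + d.1 < (R : Int) ∧ 0 ≤ c + d.2 ∧ c + d.2 < (C : Int) ∧
        pvCell grid (r + d.1) (c + d.2) < qv
    · rw [if_pos hcond, if_pos hcond]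
      obtain ⟨hd1, hd2, hd3, hd4, _⟩ := hcond
      obtain ⟨xN, hxId, hxLt⟩ := pvIdLt h1 h2 h3 h4
      obtain ⟨yN, hyId, hyLt⟩ := pvIdLt hd1 hd2 hd3 hd4
      have hUR := pvUnionRelabel uf comp bucket hInv hxLt hyLt
      rw [← hxId, ← hyId] at hUR
      exact ih _ _ _ hUR
    · rw [if_neg hcond, if_neg hcond]
      exact ih uf comp bucket hInv

theorem pvSweep_lock {grid : List (List Int)} {R C : Nat} {qv : Int}
    {nums : List (Int × Int × Int)}
    (hmem : ∀ t ∈ nums, 0 ≤ t.2.1 ∧ t.2.1 < (R : Int) ∧ 0 ≤ t.2.2 ∧ t.2.2 < (C : Int)) :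
    ∀ (fuel ni : Nat) (uf : PVUF) (comp : List Int) (bucket : List (List Int)),
    PVInv (R * C) uf.parent uf.rank comp bucket →
    (pvSweepA grid (R : Int) (C : Int) qv nums fuel ni uf).1 =
      (pvSweepB grid (R : Int) (C : Int) qv nums fuel ni (comp, bucket)).1 ∧
    PVInv (R * C)
      (pvSweepA grid (R : Int) (C : Int) qv nums fuel ni uf).2.parent
      (pvSweepA grid (R : Int) (C : Int) qv nums fuel ni uf).2.rank
      (pvSweepB grid (R : Int) (C : Int) qv nums fuel ni (comp, bucket)).2.1
      (pvSweepB grid (R : Int) (C : Int) qv nums fuel ni (comp, bucket)).2.2 := by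
  intro fuel
  induction fuel with
  | zero => intro ni uf comp bucket h; exact ⟨rfl, h⟩
  | succ fuel ih =>
    intro ni uf comp bucket hInv
    cases hnums : nums[ni]? with
    | none => simp only [pvSweepA, pvSweepB, hnums]; exact ⟨trivial, hInv⟩
    | some t =>
      have ht := hmem t (List.mem_of_getElem? hnums)
      obtain ⟨ht1, ht2, ht3, ht4⟩ := ht
      by_cases hqv : t.1 < qv
      · simp only [pvSweepA, pvSweepB, hnums, if_pos hqv]
        exact ih (ni + 1) _ _ _ (pvStep_lock ht1 ht2 ht3 ht4 pvDir4 uf comp bucket hInv)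
      · simp only [pvSweepA, pvSweepB, hnums, if_neg hqv]
        exact ⟨trivial, hInv⟩

theorem pvFold_lock {grid : List (List Int)} {R C : Nat} {nums : List (Int × Int × Int)}
    (hmem : ∀ t ∈ nums, 0 ≤ t.2.1 ∧ t.2.1 < (R : Int) ∧ 0 ≤ t.2.2 ∧ t.2.2 < (C : Int))
    (hpos : 0 < R * C) :
    ∀ (Q : List (Int × Int)) (ni : Nat) (res : List Int) (uf : PVUF)
      (comp : List Int) (bucket : List (List Int)),
    PVInv (R * C) uf.parent uf.rank comp bucket →
    (Q.foldl (fun (st : Nat × List Int × PVUF) q =>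
        let s := pvSweepA grid (R : Int) (C : Int) q.1 nums nums.length st.1 st.2.2
        if pvCell grid 0 0 < q.1 then
          let f0 := pvFind s.2 0
          (s.1, PySem.List.pySetD st.2.1 q.2 (pvGetI f0.2.rank f0.1), f0.2)
        else (s.1, st.2.1, s.2)) (ni, res, uf)).2.1 =
    (Q.foldl (fun (st : Nat × List Int × (List Int × List (List Int))) q =>
        let s := pvSweepB grid (R : Int) (C : Int) q.1 nums nums.length st.1 st.2.2
        if pvCell grid 0 0 < q.1 then
          (s.1, PySem.List.pySetD st.2.1 q.2
            (((pvGetL s.2.2 (pvGetI s.2.1 0)).length : Nat) : Int), s.2)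
        else (s.1, st.2.1, s.2)) (ni, res, (comp, bucket))).2.1 := by
  intro Q
  induction Q with
  | nil => intro ni res uf comp bucket _; rfl
  | cons q Q ih =>
    intro ni res uf comp bucket hInv
    rw [List.foldl_cons, List.foldl_cons]
    obtain ⟨hs1, hsInv⟩ := pvSweep_lock hmem nums.length ni uf comp bucket hInv
    by_cases hq : pvCell grid 0 0 < q.1
    · simp only [if_pos hq]
      obtain ⟨r0, uf', heq, hrk', hn', hp', hInv', hr0n, hroot', hlbl0, hroots'⟩ :=
        pvFind_spec (pvSweepA grid (R : Int) (C : Int) q.1 nums nums.length ni uf).2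
          hsInv (x := 0) hpos
      have heq0 : pvFind (pvSweepA grid (R : Int) (C : Int) q.1 nums nums.length ni uf).2
          (0 : Int) = (((r0 : Nat) : Int), uf') := by exact_mod_cast heq
      rw [heq0]
      -- the two recorded values are equal
      have hval : pvGetI uf'.rank ((r0 : Nat) : Int) =
          (((pvGetL (pvSweepB grid (R : Int) (C : Int) q.1 nums nums.length ni
              (comp, bucket)).2.2
            (pvGetI (pvSweepB grid (R : Int) (C : Int) q.1 nums nums.length ni
              (comp, bucket)).2.1 0)).length : Nat) : Int) := by
        have hA : pvGetI uf'.rank ((r0 : Nat) : Int) = uf'.rank.getD r0 0 := by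
          unfold pvGetI; rw [Int.toNat_natCast]
        have hrkval := hInv'.rk r0 hr0n hroot'
        rw [hlbl0] at hrkval
        have hB1 : pvGetI (pvSweepB grid (R : Int) (C : Int) q.1 nums nums.length ni
            (comp, bucket)).2.1 0 =
            ((pvLbl (pvSweepB grid (R : Int) (C : Int) q.1 nums nums.length ni
              (comp, bucket)).2.1 0 : Nat) : Int) := by
          unfold pvGetI pvLbl
          exact (Int.toNat_of_nonneg (hInv'.cnn 0 hpos)).symm
        rw [hA, hrkval, hB1]
        unfold pvGetL pvBk
        rw [Int.toNat_natCast]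
      rw [hval, hs1]
      exact ih _ _ uf' _ _ hInv'
    · simp only [if_neg hq]
      rw [hs1]
      exact ih _ _ _ _ _ hsInv

theorem pvGetD_pyRange (m : Nat) (i : Nat) (hi : i < m) :
    (PySem.List.pyRange 0 (m : Int) 1).getD i 0 = (i : Int) := by
  rw [PySem.List.pyRange_one]
  simp only [Int.sub_zero, Int.toNat_natCast]
  rw [List.getD_eq_getElem?_getD]
  rw [List.getElem?_map]
  rw [List.getElem?_range hi]
  simp

theorem pvLen_pyRange (m : Nat) : (PySem.List.pyRange 0 (m : Int) 1).length = m := by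
  rw [PySem.List.length_pyRange_one]
  simp

theorem pvInvInit (m : Nat) :
    PVInv m (PySem.List.pyRange 0 (m : Int) 1) (PySem.List.pyRepeat [1] (m : Int))
      (PySem.List.pyRange 0 (m : Int) 1)
      ((PySem.List.pyRange 0 (m : Int) 1).map (fun i => [i])) := by
  have hrep : PySem.List.pyRepeat [(1 : Int)] (m : Int) = List.replicate m 1 := by
    rw [PySem.List.pyRepeat_singleton, Int.toNat_natCast]
  have hrk : ∀ i : Nat, i < m → (PySem.List.pyRepeat [(1 : Int)] (m : Int)).getD i 0 = 1 := by
    intro i hi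
    rw [hrep, List.getD_eq_getElem?_getD, List.getElem?_replicate, if_pos hi]
    rfl
  have hbuck : ∀ l : Nat, l < m →
      pvBk ((PySem.List.pyRange 0 (m : Int) 1).map (fun i => [i])) l = [(l : Int)] := by
    intro l hl
    unfold pvBk
    rw [List.getD_eq_getElem?_getD, List.getElem?_map]
    have : (PySem.List.pyRange 0 (m : Int) 1)[l]? = some ((l : Int)) := by
      rw [List.getElem?_eq_getElem (by rw [pvLen_pyRange]; exact hl)]
      rw [PySem.List.getElem_pyRange_one]
      simp
    rw [this]
    rfl
  have hroot : ∀ i : Nat, i < m → pvRootP (PySem.List.pyRange 0 (m : Int) 1) i := by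
    intro i hi
    unfold pvRootP
    exact pvGetD_pyRange m i hi
  have hlbl : ∀ i : Nat, i < m → pvLbl (PySem.List.pyRange 0 (m : Int) 1) i = i := by
    intro i hi
    unfold pvLbl
    rw [pvGetD_pyRange m i hi, Int.toNat_natCast]
  have hpf : ∀ i : Nat, i < m → pvPF (PySem.List.pyRange 0 (m : Int) 1) i = i := by
    intro i hi
    unfold pvPF
    rw [pvGetD_pyRange m i hi, Int.toNat_natCast]
  constructor
  case plen => exact pvLen_pyRange m
  case rlen => rw [hrep]; simp
  case clen => exact pvLen_pyRange m
  case blen => simp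
  case pnn => intro i hi; rw [pvGetD_pyRange m i hi]; positivity
  case plt => intro i hi; rw [hpf i hi]; exact hi
  case pcomp => intro i hi; rw [hpf i hi]
  case reach => intro i hi; exact ⟨0, by simpa using hroot i hi⟩
  case cnn => intro i hi; rw [pvGetD_pyRange m i hi]; positivity
  case clt => intro i hi; rw [hlbl i hi]; exact hi
  case buniq =>
    intro i hi j hj _ _ h3
    rw [hlbl i hi, hlbl j hj] at h3
    exact h3
  case bmem =>
    intro i hi
    rw [hlbl i hi, hbuck i hi]
    exact List.mem_singleton.mpr rfl
  case bsound =>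
    intro l hl v hv
    rw [hbuck l hl] at hv
    rw [List.mem_singleton] at hv
    subst hv
    exact ⟨by positivity, by rw [Int.toNat_natCast]; exact hl, by rw [Int.toNat_natCast]; exact hlbl l hl⟩
  case bnodup =>
    intro l hl
    rw [hbuck l hl]
    exact List.nodup_singleton _
  case rk =>
    intro i hi _
    rw [hrk i hi, hlbl i hi, hbuck i hi]
    rfl

-- ===== VERDICT (by name: the statement is the Claim_ definition above) =====
theorem maxPoints2_spec : Claim_equal_maxPoints2 := by
  intro grid queries hdom hpre
  obtain ⟨hgne, hrows, hcq⟩ := hpre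
  unfold Spec_maxPoints2
  show maxPoints2 grid queries = maxPoints2_alt grid queries
  by_cases hq : queries = []
  · subst hq
    rfl
  · simp only [maxPoints2, maxPoints2_alt]
    rw [pvNums0_eq]
    have hcast : (grid.length : Int) * ((grid.headD []).length : Int) =
        ((grid.length * (grid.headD []).length : Nat) : Int) := by push_cast; ring
    rw [hcast]
    have hQlen : (PySem.List.sorted ((PySem.List.enumerate queries).map
        (fun p => (p.2, p.1))) (fun t => t.1) false).length = queries.length := by
      rw [PySem.List.length_sorted, List.length_map, PySem.List.length_enumerate]
    rw [hQlen]
    have hC0 : 0 < (grid.headD []).length := Nat.pos_of_ne_zero (fun h => hq (hcq h))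
    have hR0 : 0 < grid.length := by
      cases grid with
      | nil => exact absurd rfl hgne
      | cons a l => simp
    have hpos : 0 < grid.length * (grid.headD []).length := Nat.mul_pos hR0 hC0
    have hmem : ∀ t ∈ PySem.List.sorted
        ((PySem.List.pyRange 0 (grid.length : Int) 1).flatMap (fun r =>
          (PySem.List.pyRange 0 ((grid.headD []).length : Int) 1).map
            (fun c => (pvCell grid r c, r, c)))) (fun t => t.1) false,
        0 ≤ t.2.1 ∧ t.2.1 < (grid.length : Int) ∧ 0 ≤ t.2.2 ∧
          t.2.2 < ((grid.headD []).length : Int) := by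
      intro t ht
      rw [PySem.List.mem_sorted] at ht
      rw [List.mem_flatMap] at ht
      obtain ⟨r, hr, ht⟩ := ht
      rw [List.mem_map] at ht
      obtain ⟨c, hc, rfl⟩ := ht
      rw [PySem.List.mem_pyRange_one] at hr hc
      exact ⟨hr.1, hr.2, hc.1, hc.2⟩
    exact pvFold_lock hmem hpos _ 0 _ _ _ _ (pvInvInit _)
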